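-- pv_equiv track=rewrite | github.com/scottonanski/persistent-mind-model-v1.0 | pmm/runtime/adaptive_cadence.py | _calculate_max_run_length
-- ===== SOURCE A (Python) =====
-- def _calculate_max_run_length(kinds: list[str]) -> int:
--     """Calculate the longest streak of consecutive same-kind events."""
--     if not kinds:
--         return 0
--
--     max_run = 1
--     current_run = 1
--     prev_kind = kinds[0]
--
--     for kind in kinds[1:]:
--         if kind == prev_kind:
--             current_run += 1
--             max_run = max(max_run, current_run)
--         else:
--             current_run = 1
--             prev_kind = kind
--
--     return max_run
-- ===== SOURCE B (Python) =====
-- def _calculate_max_run_length(kinds: list[str]) -> int: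
--     """Longest streak of consecutive same-kind events, computed in stages:
--     find the run boundaries (indices where a new run starts), pair each start
--     with the next boundary, and take the maximum pairwise difference."""
--     n = len(kinds)
--     starts = [i for i in range(n) if i == 0 or kinds[i] != kinds[i - 1]]
--     ends = starts[1:] + [n]
--     return max((e - s for s, e in zip(starts, ends)), default=0)
-- ===== Notes on version B (the rewrite author's own statement) =====
-- stated objective: alternative
-- what changed: Replaces A's single-pass running-counter scan (current_run/max_run/prev_kind state) by a staged boundary computation: a comprehension collects the indices where a new run starts, each start is zipped with the next boundary, and the answer is the maximum pairwise difference with default 0.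
import Mathlib
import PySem

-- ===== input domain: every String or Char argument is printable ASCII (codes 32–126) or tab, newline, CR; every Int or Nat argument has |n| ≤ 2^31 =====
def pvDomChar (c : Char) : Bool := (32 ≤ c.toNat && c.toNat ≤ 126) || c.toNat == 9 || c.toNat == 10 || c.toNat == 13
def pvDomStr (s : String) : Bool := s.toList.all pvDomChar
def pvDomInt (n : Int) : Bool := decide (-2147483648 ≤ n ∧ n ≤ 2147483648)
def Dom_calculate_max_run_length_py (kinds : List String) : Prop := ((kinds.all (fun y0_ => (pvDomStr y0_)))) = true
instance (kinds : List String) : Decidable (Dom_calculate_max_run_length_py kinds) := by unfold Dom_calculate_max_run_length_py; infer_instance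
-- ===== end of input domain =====

-- B replaces A's running-counter scan by a staged computation: collect the run-start
-- boundaries, zip each start with the next boundary, take the max pairwise difference.

-- ===== PORT A =====
-- the 'for kind in kinds[1:]' loop over state (max_run, current_run, prev_kind)
def loopA : List String → Int → Int → String → Int
  | [], max_run, _, _ => max_run
  | kind :: rest, max_run, current_run, prev_kind =>
    if kind == prev_kind then
      loopA rest (max max_run (current_run + 1)) (current_run + 1) prev_kind
    else
      loopA rest max_run 1 kind

def calculate_max_run_length_py (kinds : List String) : Int :=
  match kinds with
  | [] => 0
  | k0 :: rest => loopA rest 1 1 k0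

-- ===== PORT B =====
-- the comprehension '[i for i in range(n) if i == 0 or kinds[i] != kinds[i-1]]';
-- range(n) yields the Nat indices 0..n-1, always in range, so getD is exact here
-- (and for i = 0 the 'or' short-circuits in Python just as '||' does here).
def startsB (kinds : List String) : List Nat :=
  (List.range kinds.length).filter
    (fun i => decide (i = 0) || !(kinds.getD i "" == kinds.getD (i - 1) ""))

-- 'max(gen, default=0)': empty generator gives 0, otherwise a left fold of max
def calculate_max_run_length_py_alt (kinds : List String) : Int :=
  let n := kinds.length
  let starts := startsB kinds
  let ends := starts.drop 1 ++ [n]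
  let diffs := (starts.zip ends).map (fun p => ((p.2 : Nat) : Int) - ((p.1 : Nat) : Int))
  match diffs with
  | [] => 0
  | d :: ds => ds.foldl max d

-- ===== PRECONDITION & SPEC =====
def Spec_calculate_max_run_length_py (kinds : List String) (out : Int) : Prop := out = calculate_max_run_length_py_alt kinds
instance (kinds : List String) (out : Int) : Decidable (Spec_calculate_max_run_length_py kinds out) := by unfold Spec_calculate_max_run_length_py; infer_instance

-- ===== CLAIM (what is proved, stated in full; the proofs are below) =====
def Claim_equal_calculate_max_run_length_py : Prop := ∀ (kinds : List String), Dom_calculate_max_run_length_py kinds → Spec_calculate_max_run_length_py kinds (calculate_max_run_length_py kinds)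

-- ===== LEMMAS AND PROOFS =====

-- reference function: max run length by maximal-run decomposition
def runMax : List String → Int
  | [] => 0
  | x :: xs =>
    max (1 + ((xs.takeWhile (fun k => k == x)).length : Int))
        (runMax (xs.dropWhile (fun k => k == x)))
termination_by l => l.length
decreasing_by simpa using Nat.lt_succ_of_le (List.length_dropWhile_le _ _)

theorem runMax_nonneg : ∀ (l : List String), 0 ≤ runMax l := by
  intro l
  induction l using runMax.induct with
  | case1 => simp [runMax]
  | case2 x xs ih =>
    rw [runMax]
    have h1 : (0:Int) ≤ ((xs.takeWhile (fun k => k == x)).length : Int) := by positivity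
    omega

theorem dropWhile_eq_drop_len {α : Type} (p : α → Bool) :
    ∀ l : List α, l.dropWhile p = l.drop (l.takeWhile p).length := by
  intro l
  induction l with
  | nil => rfl
  | cons a l ih =>
    by_cases h : p a = true
    · simp [List.dropWhile_cons_of_pos h, List.takeWhile_cons_of_pos h, ih]
    · simp [List.dropWhile_cons_of_neg h, List.takeWhile_cons_of_neg h]

-- recursive form of the zip-with-next-boundary differences
def pvD : List Nat → Nat → List Int
  | [], _ => []
  | [a], n => [(n : Int) - (a : Int)]
  | a :: b :: l, n => ((b : Int) - (a : Int)) :: pvD (b :: l) n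

def diffsTo (s : List Nat) (n : Nat) : List Int :=
  (s.zip (s.drop 1 ++ [n])).map (fun p => ((p.2 : Nat) : Int) - ((p.1 : Nat) : Int))

theorem diffsTo_eq : ∀ (s : List Nat) (n : Nat), diffsTo s n = pvD s n
  | [], _ => rfl
  | [_], _ => rfl
  | a :: b :: l, n => by
    have ih := diffsTo_eq (b :: l) n
    simp only [diffsTo, List.drop_succ_cons, List.drop_zero, List.cons_append,
      List.zip_cons_cons, List.map_cons, pvD] at *
    rw [ih]

def maxD : List Int → Int
  | [] => 0
  | d :: ds => ds.foldl max d

theorem maxD_cons (d : Int) (ds : List Int) : maxD (d :: ds) = ds.foldl max d := rfl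

theorem alt_eq_maxD (kinds : List String) :
    calculate_max_run_length_py_alt kinds = maxD (pvD (startsB kinds) kinds.length) := by
  rw [← diffsTo_eq]
  unfold calculate_max_run_length_py_alt diffsTo maxD
  rfl

theorem foldl_max_comm : ∀ (l : List Int) (c d : Int),
    l.foldl max (max c d) = max c (l.foldl max d) := by
  intro l
  induction l with
  | nil => intro c d; rfl
  | cons e l ih =>
    intro c d
    simp only [List.foldl_cons]
    rw [max_assoc, ih]

theorem foldl_max_eq_maxD (l : List Int) (c : Int) (hc : 0 ≤ c) :
    l.foldl max c = max c (maxD l) := by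
  cases l with
  | nil => simp [maxD]; omega
  | cons d ds =>
    simp only [List.foldl_cons, maxD]
    exact foldl_max_comm ds c d

theorem pvD_shift : ∀ (s : List Nat) (r n : Nat), r ≤ n →
    pvD (s.map (fun j => r + j)) n = pvD s (n - r)
  | [], _, _, _ => rfl
  | [a], r, n, h => by
    simp only [List.map_cons, List.map_nil, pvD, List.cons.injEq, and_true]
    push_cast [Nat.cast_sub h]
    ring
  | a :: b :: l, r, n, h => by
    have ih := pvD_shift (b :: l) r n h
    simp only [List.map_cons, pvD] at *
    rw [show ((r + b : Nat) : Int) - ((r + a : Nat) : Int) = (b : Int) - (a : Int) by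
          push_cast; ring, ih]

theorem takeWhile_getD : ∀ (xs : List String) (x : String) (i : Nat),
    i < (xs.takeWhile (fun k => k == x)).length → xs.getD i "" = x := by
  intro xs x
  induction xs with
  | nil => intro i hi; simp at hi
  | cons k ks ih =>
    intro i hi
    by_cases hk : (k == x) = true
    · simp only [List.takeWhile_cons, hk, if_true] at hi
      cases i with
      | zero => simpa using eq_of_beq hk
      | succ j =>
        simp only [List.length_cons, Nat.succ_lt_succ_iff] at hi
        simpa using ih j hi
    · simp only [List.takeWhile_cons, hk, Bool.false_eq_true, if_false] at hi
      simp at hi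

theorem dropWhile_head_ne : ∀ (xs : List String) (x : String),
    xs.dropWhile (fun k => k == x) ≠ [] →
    (((xs.dropWhile (fun k => k == x)).getD 0 "") == x) = false := by
  intro xs x
  induction xs with
  | nil => intro h; simp at h
  | cons k ks ih =>
    intro h
    by_cases hk : (k == x) = true
    · simp only [List.dropWhile_cons, hk, if_true] at h ⊢
      exact ih h
    · simp only [List.dropWhile_cons, hk, Bool.false_eq_true, if_false] at h ⊢
      simpa using hk

-- the run decomposition of the boundary list
theorem startsB_decomp (x : String) (xs : List String) :
    startsB (x :: xs)
      = 0 :: (startsB (xs.dropWhile (fun k => k == x))).map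
          (fun j => ((xs.takeWhile (fun k => k == x)).length + 1) + j) := by
  set t := (xs.takeWhile (fun k => k == x)).length with ht
  set rest := xs.dropWhile (fun k => k == x) with hrest
  set r := t + 1 with hr
  set kinds := x :: xs with hkinds
  set P : Nat → Bool :=
    fun i => decide (i = 0) || !(kinds.getD i "" == kinds.getD (i - 1) "") with hP
  have htw : kinds.takeWhile (fun k => k == x) = x :: xs.takeWhile (fun k => k == x) := by
    simp [hkinds]
  have hK : ∀ i < r, kinds.getD i "" = x := by
    intro i hi
    apply takeWhile_getD
    rw [htw]
    simp only [List.length_cons]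
    omega
  have hdrop : rest = kinds.drop r := by
    rw [hrest, dropWhile_eq_drop_len, ← ht, hkinds, hr, List.drop_succ_cons]
  have hlen : kinds.length = r + rest.length := by
    rw [hdrop, List.length_drop, hkinds]
    have hle : t ≤ xs.length := by rw [ht]; exact (List.takeWhile_prefix _).length_le
    simp only [List.length_cons]
    omega
  have hrg : ∀ j < rest.length, kinds.getD (r + j) "" = rest.getD j "" := by
    intro j hj
    rw [hdrop]
    rw [List.getD_eq_getElem?_getD, List.getD_eq_getElem?_getD, List.getElem?_drop]
  show (List.range kinds.length).filter P = 0 :: (startsB rest).map (fun j => r + j)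
  rw [hlen, List.range_add, List.filter_append]
  have h1 : (List.range r).filter P = [0] := by
    rw [hr, List.range_succ_eq_map, List.filter_cons]
    have hP0 : P 0 = true := by simp [hP]
    rw [if_pos hP0]
    congr 1
    rw [List.filter_eq_nil_iff]
    intro a ha
    simp only [List.mem_map, List.mem_range] at ha
    obtain ⟨j, hj, rfl⟩ := ha
    have h1 : kinds.getD (j + 1) "" = x := hK _ (by omega)
    have h2 : kinds.getD j "" = x := hK _ (by omega)
    simp only [hP, Nat.succ_eq_add_one, Nat.add_sub_cancel]
    rw [h1, h2]
    simp
  have h2 : ((List.range rest.length).map (fun j => r + j)).filter P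
      = (startsB rest).map (fun j => r + j) := by
    rw [List.filter_map]
    unfold startsB
    congr 1
    apply List.filter_congr
    intro j hj
    rw [List.mem_range] at hj
    simp only [Function.comp_apply]
    cases j with
    | zero =>
      have hne : rest ≠ [] := by
        intro hnil; rw [hnil] at hj; simp at hj
      have hx : kinds.getD (r - 1) "" = x := hK _ (by omega)
      have hr0 : kinds.getD (r + 0) "" = rest.getD 0 "" := hrg 0 hj
      have hhead := dropWhile_head_ne xs x (by rw [← hrest]; exact hne)
      rw [← hrest] at hhead
      simp only [hP, Nat.add_zero]
      rw [show kinds.getD r "" = rest.getD 0 "" by simpa using hr0, hx, hhead]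
      simp [hr]
    | succ j' =>
      have ha : kinds.getD (r + (j' + 1)) "" = rest.getD (j' + 1) "" := hrg _ hj
      have hb : kinds.getD (r + (j' + 1) - 1) "" = rest.getD j' "" := by
        have : r + (j' + 1) - 1 = r + j' := by omega
        rw [this]
        exact hrg j' (by omega)
      simp only [hP]
      rw [ha, hb]
      simp [hr]
  rw [h1, h2]
  rfl

theorem startsB_cons (y : String) (ys : List String) :
    ∃ s, startsB (y :: ys) = 0 :: s := by
  refine ⟨_, startsB_decomp y ys⟩

theorem alt_eq_runMax : ∀ (kinds : List String),
    calculate_max_run_length_py_alt kinds = runMax kinds := by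
  intro kinds
  induction kinds using runMax.induct with
  | case1 => simp [calculate_max_run_length_py_alt, startsB, runMax]
  | case2 x xs ih =>
    set t := (xs.takeWhile (fun k => k == x)).length with ht
    set rest := xs.dropWhile (fun k => k == x) with hrest
    set r := t + 1 with hr
    have hle : t ≤ xs.length := by rw [ht]; exact (List.takeWhile_prefix _).length_le
    have hlen : (x :: xs).length = r + rest.length := by
      have := dropWhile_eq_drop_len (fun k => k == x) xs
      rw [← hrest, ← ht] at this
      have h2 : rest.length = xs.length - t := by rw [this, List.length_drop]
      simp only [List.length_cons]
      omega
    rw [alt_eq_maxD, startsB_decomp x xs, ← ht, ← hrest, ← hr, runMax, ← ht, ← hrest, ← ih,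
        alt_eq_maxD]
    cases hcase : startsB rest with
    | nil =>
      have hrnil : rest = [] := by
        cases hre : rest with
        | nil => rfl
        | cons y ys =>
          obtain ⟨s, hs⟩ := startsB_cons y ys
          rw [hre, hs] at hcase
          exact absurd hcase (by simp)
      have hl : (x :: xs).length = r := by rw [hlen, hrnil]; simp
      simp only [List.map_nil, pvD, maxD, List.foldl_nil, hl]
      push_cast
      omega
    | cons a s =>
      have ha0 : a = 0 := by
        cases hre : rest with
        | nil => rw [hre] at hcase; simp [startsB] at hcase
        | cons y ys =>
          obtain ⟨s', hs⟩ := startsB_cons y ys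
          rw [hre, hs] at hcase
          exact (List.cons.injEq _ _ _ _ ▸ hcase).1.symm
      subst ha0
      simp only [List.map_cons, pvD]
      have hlen2 : (x :: xs).length - r = rest.length := by omega
      rw [show ((r + 0) :: List.map (fun j => r + j) s) = List.map (fun j => r + j) (0 :: s)
            from by simp,
          pvD_shift (0 :: s) r _ (by omega), hlen2,
          maxD_cons, foldl_max_eq_maxD _ _ (by push_cast; omega)]
      push_cast
      omega

-- A's scan equals the run decomposition
theorem loopA_spec :
    ∀ (xs : List String) (m c : Int) (p : String), 1 ≤ c → c ≤ m →
      loopA xs m c p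
        = max m (max (c + ((xs.takeWhile (fun k => k == p)).length : Int))
                     (runMax (xs.dropWhile (fun k => k == p)))) := by
  intro xs
  induction xs with
  | nil =>
    intro m c p h1 h2
    simp [loopA, runMax]; omega
  | cons k ks ih =>
    intro m c p h1 h2
    by_cases hk : (k == p) = true
    · rw [show loopA (k :: ks) m c p = loopA ks (max m (c + 1)) (c + 1) p by
            simp [loopA, hk],
          ih _ _ _ (by omega) (le_max_right _ _)]
      simp only [List.takeWhile_cons, List.dropWhile_cons, hk, if_true, List.length_cons]
      push_cast
      omega
    · have hk' : (k == p) = false := by simpa using hk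
      rw [show loopA (k :: ks) m c p = loopA ks m 1 k by simp [loopA, hk'],
          ih _ _ _ le_rfl (by omega)]
      simp only [List.takeWhile_cons, List.dropWhile_cons, hk', Bool.false_eq_true, if_false]
      rw [runMax]
      simp only [List.length_nil, Nat.cast_zero, add_zero]
      omega

-- ===== VERDICT (by name: the statement is the Claim_ definition above) =====
theorem calculate_max_run_length_py_spec : Claim_equal_calculate_max_run_length_py := by
  intro kinds _
  show calculate_max_run_length_py kinds = calculate_max_run_length_py_alt kinds
  cases kinds with
  | nil => rfl
  | cons k0 rest =>
    rw [alt_eq_runMax]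
    show loopA rest 1 1 k0 = runMax (k0 :: rest)
    rw [loopA_spec rest 1 1 k0 le_rfl le_rfl, runMax]
    have h1 : (0:Int) ≤ ((rest.takeWhile (fun k => k == k0)).length : Int) := by positivity
    have h2 := runMax_nonneg (rest.dropWhile (fun k => k == k0))
    omega
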